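-- pv_equiv track=rewrite | github.com/shah-data-scientist/Sports_See_ReAct | archive/sql_tool_custom_chain.py | _build_abbreviations_block
-- ===== SOURCE A (Python) =====
-- def _build_abbreviations_block(entries: list[dict[str, str | None]]) -> str:
--     """Build the KEY ABBREVIATIONS block for the SQL prompt from dictionary entries.
--
--     Args:
--         entries: Dictionary entries from _load_dictionary_from_db()
--
--     Returns:
--         Formatted string for prompt injection
--     """
--     if not entries:
--         # Fallback: hardcoded minimal abbreviations (pre-dictionary behavior)
--         return (
--             "KEY ABBREVIATIONS:\n"
--             "- GP = Games Played | PTS = Points | REB = Rebounds | AST = Assists\n"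
--             "- FG_PCT = Field Goal % | THREE_PCT = 3-Point % | TS_PCT = True Shooting %\n"
--             "- PIE = Player Impact Estimate"
--         )
--
--     # Group by table for clarity
--     player_stats_entries = [e for e in entries if e["table_name"] == "player_stats"]
--     player_entries = [e for e in entries if e["table_name"] == "players"]
--
--     lines = ["COLUMN REFERENCE (abbreviation = full name -> SQL column):"]
--
--     if player_entries:
--         lines.append("Players table:")
--         for e in player_entries:
--             lines.append(f"  {e['abbreviation']} = {e['full_name']} -> {e['column_name']}")
--
--     if player_stats_entries:
--         lines.append("Player_stats table:")
--         for e in player_stats_entries: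
--             lines.append(f"  {e['abbreviation']} = {e['full_name']} -> {e['column_name']}")
--
--     return "\n".join(lines)
-- ===== SOURCE B (Python) =====
-- def _build_abbreviations_block(entries: list[dict[str, str | None]]) -> str:
--     if not entries:
--         return (
--             "KEY ABBREVIATIONS:\n"
--             "- GP = Games Played | PTS = Points | REB = Rebounds | AST = Assists\n"
--             "- FG_PCT = Field Goal % | THREE_PCT = 3-Point % | TS_PCT = True Shooting %\n"
--             "- PIE = Player Impact Estimate"
--         )
--
--     # Tag each relevant entry with its section rank, stable-sort by rank, then scan the
--     # sorted list once, emitting a section header whenever the rank changes.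
--     RANKS = {"players": 0, "player_stats": 1}
--     HEADERS = ("Players table:", "Player_stats table:")
--     tagged = [(RANKS[t], e) for e in entries if (t := e["table_name"]) in RANKS]
--
--     out = "COLUMN REFERENCE (abbreviation = full name -> SQL column):"
--     prev = None
--     for rank, e in sorted(tagged, key=lambda p: p[0]):
--         if rank != prev:
--             out += "\n" + HEADERS[rank]
--             prev = rank
--         out += f"\n  {e['abbreviation']} = {e['full_name']} -> {e['column_name']}"
--     return out
-- ===== Notes on version B (the rewrite author's own statement) =====
-- stated objective: alternative
-- what changed: Replaces A's two filter passes and static two-section layout by a tag/stable-sort/scan algorithm: relevant entries are tagged with a section rank, stably sorted by rank, and a single scan emits a section header whenever the rank changes.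
import Mathlib
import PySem

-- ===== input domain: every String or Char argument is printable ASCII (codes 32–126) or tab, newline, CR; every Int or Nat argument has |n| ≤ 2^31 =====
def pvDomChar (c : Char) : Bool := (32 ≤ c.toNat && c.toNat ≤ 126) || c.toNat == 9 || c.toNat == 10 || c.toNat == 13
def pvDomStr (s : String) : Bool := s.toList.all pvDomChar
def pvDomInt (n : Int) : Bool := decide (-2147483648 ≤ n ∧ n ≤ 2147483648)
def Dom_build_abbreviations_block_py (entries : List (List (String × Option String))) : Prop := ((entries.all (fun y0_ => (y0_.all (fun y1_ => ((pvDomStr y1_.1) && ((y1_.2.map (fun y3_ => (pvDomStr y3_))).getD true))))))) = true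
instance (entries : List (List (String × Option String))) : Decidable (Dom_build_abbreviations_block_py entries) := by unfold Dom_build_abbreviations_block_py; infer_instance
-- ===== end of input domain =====

-- B replaces A's two filter passes + static section layout by a tag/stable-sort/scan
-- algorithm (sort by section rank, emit a header on each rank change) — objective:
-- alternative algorithm, same output.

-- shared helpers: dict lookup on an entry, the f-string line, the empty fallback
def pvEntryGet (e : List (String × Option String)) (k : String) : Option (Option String) :=
  (PySem.Dict.mk e).get? k

def pvFmtLine (e : List (String × Option String)) : String :=
  "  " ++ ((pvEntryGet e "abbreviation").getD none).getD "None"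
  ++ " = " ++ ((pvEntryGet e "full_name").getD none).getD "None"
  ++ " -> " ++ ((pvEntryGet e "column_name").getD none).getD "None"

def pvFallback : String :=
  "KEY ABBREVIATIONS:\n- GP = Games Played | PTS = Points | REB = Rebounds | AST = Assists\n- FG_PCT = Field Goal % | THREE_PCT = 3-Point % | TS_PCT = True Shooting %\n- PIE = Player Impact Estimate"

-- ===== PORT A =====
def build_abbreviations_block_py (entries : List (List (String × Option String))) : String :=
  if entries.isEmpty then pvFallback
  else
    let player_stats_entries := entries.filter (fun e => pvEntryGet e "table_name" == some (some "player_stats"))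
    let player_entries := entries.filter (fun e => pvEntryGet e "table_name" == some (some "players"))
    let lines := ["COLUMN REFERENCE (abbreviation = full name -> SQL column):"]
    let lines := if !player_entries.isEmpty
      then lines ++ ["Players table:"] ++ player_entries.map pvFmtLine else lines
    let lines := if !player_stats_entries.isEmpty
      then lines ++ ["Player_stats table:"] ++ player_stats_entries.map pvFmtLine else lines
    PySem.Str.join "\n" lines

-- ===== PORT B =====
-- e["table_name"] as a value of type str | None; missing key is excluded by Pre_
def pvTableKey (e : List (String × Option String)) : Option String :=
  (pvEntryGet e "table_name").getD none

-- RANKS.get(t): section rank of an entry, none when t is not a RANKS key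
def pvRank? (e : List (String × Option String)) : Option Nat :=
  if pvTableKey e == some "players" then some 0
  else if pvTableKey e == some "player_stats" then some 1
  else none

-- HEADERS[rank]
def pvHeader (r : Nat) : String :=
  if r == 0 then "Players table:" else "Player_stats table:"

-- one scan step: emit the section header when the rank changes, then the entry's line
def pvStep (st : Option Nat × String) (p : Nat × List (String × Option String)) :
    Option Nat × String :=
  let st' := if st.1 == some p.1 then st else (some p.1, st.2 ++ "\n" ++ pvHeader p.1)
  (st'.1, st'.2 ++ "\n" ++ pvFmtLine p.2)

def build_abbreviations_block_py_alt (entries : List (List (String × Option String))) : String :=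
  if entries.isEmpty then pvFallback
  else
    let tagged := entries.filterMap (fun e => (pvRank? e).map (fun r => (r, e)))
    (PySem.List.sorted tagged (fun p => p.1) false |>.foldl pvStep
      (none, "COLUMN REFERENCE (abbreviation = full name -> SQL column):")).2

-- ===== PRECONDITION & SPEC =====
-- Pre_ excludes exactly the inputs on which Python A raises KeyError: an entry without a
-- "table_name" key, or a players/player_stats entry missing one of the three formatted keys.
def Pre_build_abbreviations_block_py (entries : List (List (String × Option String))) : Prop :=
  (entries.all (fun e =>
    (pvEntryGet e "table_name").isSome &&
    (if pvEntryGet e "table_name" == some (some "players")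
        || pvEntryGet e "table_name" == some (some "player_stats")
     then (pvEntryGet e "abbreviation").isSome && (pvEntryGet e "full_name").isSome
          && (pvEntryGet e "column_name").isSome
     else true))) = true
instance (entries : List (List (String × Option String))) : Decidable (Pre_build_abbreviations_block_py entries) := by unfold Pre_build_abbreviations_block_py; infer_instance

def pvWitness_build_abbreviations_block_py : (List (List (String × Option String))) :=
  [[("table_name", some "players"), ("abbreviation", some "GP"),
    ("full_name", some "Games Played"), ("column_name", some "gp")],
   [("table_name", some "player_stats"), ("abbreviation", some "PTS"),
    ("full_name", some "Points"), ("column_name", some "pts")]]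

def Spec_build_abbreviations_block_py (entries : List (List (String × Option String))) (out : String) : Prop := out = build_abbreviations_block_py_alt entries
instance (entries : List (List (String × Option String))) (out : String) : Decidable (Spec_build_abbreviations_block_py entries out) := by unfold Spec_build_abbreviations_block_py; infer_instance

-- ===== CLAIM (what is proved, stated in full; the proofs are below) =====
def Claim_equal_build_abbreviations_block_py : Prop := ∀ (entries : List (List (String × Option String))), Dom_build_abbreviations_block_py entries → Pre_build_abbreviations_block_py entries → Spec_build_abbreviations_block_py entries (build_abbreviations_block_py entries)

-- ===== LEMMAS AND PROOFS =====

-- inserting a 0/1-ranked element into a (zeros ++ ones) list keeps the stable partition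
theorem pvInsert_part (x : Nat × List (String × Option String))
    (A B : List (Nat × List (String × Option String)))
    (hx : x.1 ≤ 1) (hA : ∀ p ∈ A, p.1 = 0) (hB : ∀ p ∈ B, p.1 = 1) :
    PySem.List.insertBy (fun a b => decide (a.1 < b.1)) x (A ++ B)
      = if x.1 = 0 then A ++ x :: B else (A ++ B) ++ [x] := by
  induction A with
  | nil =>
    induction B with
    | nil => simp [PySem.List.insertBy]
    | cons y ys ih =>
      have hy : y.1 = 1 := hB y (by simp)
      by_cases h0 : x.1 = 0
      · simp [PySem.List.insertBy, hy, h0]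
      · have h1 : x.1 = 1 := by omega
        simp only [List.nil_append] at ih ⊢
        simp [PySem.List.insertBy, hy, h1, ih (fun p hp => hB p (by simp [hp]))]
  | cons a A' ih =>
    have ha : a.1 = 0 := hA a (by simp)
    have := ih (fun p hp => hA p (by simp [hp]))
    by_cases h0 : x.1 = 0 <;>
      simp [PySem.List.insertBy, ha, h0, this] at this ⊢

-- the insertion-sort fold over a 0/1-ranked list is the stable partition
theorem pvFold_part (l : List (Nat × List (String × Option String)))
    (A B : List (Nat × List (String × Option String)))
    (hl : ∀ p ∈ l, p.1 ≤ 1) (hA : ∀ p ∈ A, p.1 = 0) (hB : ∀ p ∈ B, p.1 = 1) :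
    l.foldl (fun acc x => PySem.List.insertBy (fun a b => decide (a.1 < b.1)) x acc) (A ++ B)
      = (A ++ l.filter (fun p => p.1 == 0)) ++ (B ++ l.filter (fun p => p.1 == 1)) := by
  induction l generalizing A B with
  | nil => simp
  | cons p t ih =>
    have hp : p.1 ≤ 1 := hl p (by simp)
    have ht : ∀ q ∈ t, q.1 ≤ 1 := fun q hq => hl q (by simp [hq])
    by_cases h0 : p.1 = 0
    · rw [List.foldl_cons, pvInsert_part p A B hp hA hB, if_pos h0]
      simp only [List.filter_cons, beq_iff_eq]
      have : A ++ p :: B = (A ++ [p]) ++ B := by simp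
      rw [this, ih (A ++ [p]) B ht
        (by intro q hq; rcases List.mem_append.mp hq with h | h
            · exact hA q h
            · simpa [List.mem_singleton.mp h] using h0) hB]
      simp [h0]
    · have h1 : p.1 = 1 := by omega
      rw [List.foldl_cons, pvInsert_part p A B hp hA hB, if_neg h0]
      simp only [List.filter_cons, beq_iff_eq]
      have : (A ++ B) ++ [p] = A ++ (B ++ [p]) := by simp
      rw [this, ih A (B ++ [p]) ht hA
        (by intro q hq; rcases List.mem_append.mp hq with h | h
            · exact hB q h
            · simpa [List.mem_singleton.mp h] using h1)]
      simp [h1]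

theorem pvSorted_part (l : List (Nat × List (String × Option String)))
    (hl : ∀ p ∈ l, p.1 ≤ 1) :
    PySem.List.sorted l (fun p => p.1) false
      = l.filter (fun p => p.1 == 0) ++ l.filter (fun p => p.1 == 1) := by
  have := pvFold_part l [] [] hl (by simp) (by simp)
  simpa [PySem.List.sorted_eq_foldl_insertBy] using this

-- the two table_name tests coincide
theorem pvKey_eq (e : List (String × Option String)) (s : String) :
    (pvTableKey e == some s) = (pvEntryGet e "table_name" == some (some s)) := by
  unfold pvTableKey
  cases h : pvEntryGet e "table_name" <;> simp

-- the tagged list's rank-r segment is the map of A's corresponding filter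
theorem pvTagged_filter0 (entries : List (List (String × Option String))) :
    ((entries.filterMap (fun e => (pvRank? e).map (fun r => (r, e)))).filter
        (fun p => p.1 == 0))
      = (entries.filter (fun e => pvEntryGet e "table_name" == some (some "players"))).map
          (fun e => (0, e)) := by
  induction entries with
  | nil => rfl
  | cons e t ih =>
    rw [List.filterMap_cons]
    by_cases hp : pvTableKey e == some "players"
    · have h0 : pvRank? e = some 0 := by simp [pvRank?, eq_of_beq hp]
      have ha : (pvEntryGet e "table_name" == some (some "players")) = true := by
        rw [← pvKey_eq]; exact hp
      simp [h0, ha, ih]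
    · by_cases hs : pvTableKey e == some "player_stats"
      · have h1 : pvRank? e = some 1 := by
          simp [pvRank?, eq_of_beq hs]
        have ha : (pvEntryGet e "table_name" == some (some "players")) = false := by
          rw [← pvKey_eq]; simpa using hp
        simp [h1, ha, ih]
      · have hn : pvRank? e = none := by
          simp only [pvRank?]
          rw [if_neg (by simpa using hp), if_neg (by simpa using hs)]
        have ha : (pvEntryGet e "table_name" == some (some "players")) = false := by
          rw [← pvKey_eq]; simpa using hp
        simp [hn, ha, ih]

theorem pvTagged_filter1 (entries : List (List (String × Option String))) :
    ((entries.filterMap (fun e => (pvRank? e).map (fun r => (r, e)))).filter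
        (fun p => p.1 == 1))
      = (entries.filter (fun e => pvEntryGet e "table_name" == some (some "player_stats"))).map
          (fun e => (1, e)) := by
  induction entries with
  | nil => rfl
  | cons e t ih =>
    rw [List.filterMap_cons]
    by_cases hp : pvTableKey e == some "players"
    · have h0 : pvRank? e = some 0 := by simp [pvRank?, eq_of_beq hp]
      have ha : (pvEntryGet e "table_name" == some (some "player_stats")) = false := by
        rw [← pvKey_eq]
        have := eq_of_beq hp
        simp [this]
      simp [h0, ha, ih]
    · by_cases hs : pvTableKey e == some "player_stats"
      · have h1 : pvRank? e = some 1 := by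
          simp [pvRank?, eq_of_beq hs]
        have ha : (pvEntryGet e "table_name" == some (some "player_stats")) = true := by
          rw [← pvKey_eq]; exact hs
        simp [h1, ha, ih]
      · have hn : pvRank? e = none := by
          simp only [pvRank?]
          rw [if_neg (by simpa using hp), if_neg (by simpa using hs)]
        have ha : (pvEntryGet e "table_name" == some (some "player_stats")) = false := by
          rw [← pvKey_eq]; simpa using hs
        simp [hn, ha, ih]

theorem pvTagged_le (entries : List (List (String × Option String))) :
    ∀ p ∈ entries.filterMap (fun e => (pvRank? e).map (fun r => (r, e))), p.1 ≤ 1 := by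
  intro p hp
  rcases List.mem_filterMap.mp hp with ⟨e, -, he⟩
  unfold pvRank? at he
  split at he
  · simp only [Option.map_some, Option.some.injEq] at he
    rw [← he]
    exact Nat.le_succ 0
  · split at he
    · simp only [Option.map_some, Option.some.injEq] at he
      rw [← he]
    · simp at he

-- scanning a constant-rank segment while already inside that section emits only lines
theorem pvScan_const (L : List (List (String × Option String))) (r : Nat) (s : String) :
    (L.map (fun e => (r, e))).foldl pvStep (some r, s)
      = (some r, L.foldl (fun a e => a ++ "\n" ++ pvFmtLine e) s) := by
  induction L generalizing s with
  | nil => rfl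
  | cons e t ih => simp [pvStep, ih]

-- scanning a nonempty constant-rank segment from outside that section emits the header first
theorem pvScan_start (L : List (List (String × Option String))) (r : Nat)
    (prev : Option Nat) (s : String) (hprev : prev ≠ some r) (hL : L ≠ []) :
    (L.map (fun e => (r, e))).foldl pvStep (prev, s)
      = (some r, L.foldl (fun a e => a ++ "\n" ++ pvFmtLine e) (s ++ "\n" ++ pvHeader r)) := by
  cases L with
  | nil => exact absurd rfl hL
  | cons e t =>
    have : (prev == some r) = false := by simpa using hprev
    simp [pvStep, this, pvScan_const]

-- "\n".join(C :: T) is the fold of "a + \n + s" starting from C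
theorem pvJoin_foldl (T : List String) (C : String) :
    PySem.Str.join "\n" (C :: T) = T.foldl (fun a s => a ++ "\n" ++ s) C := by
  induction T generalizing C with
  | nil =>
    simp only [List.foldl_nil, PySem.Str.join, List.map_cons, List.map_nil,
      PySem.Chars.join_singleton, String.ofList_toList]
  | cons s T' ih =>
    rw [List.foldl_cons, ← ih (C ++ "\n" ++ s)]
    cases T' with
    | nil =>
      simp only [PySem.Str.join, List.map_cons, List.map_nil, PySem.Chars.join_singleton,
        PySem.Chars.join_cons_cons, String.ofList_toList]
      apply String.toList_inj.mp
      simp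
    | cons u T'' =>
      apply String.toList_inj.mp
      simp only [PySem.Str.join, String.toList_ofList, List.map_cons,
        PySem.Chars.join_cons_cons]
      simp

theorem pvFoldl_map_fmt (L : List (List (String × Option String))) (s : String) :
    (L.map pvFmtLine).foldl (fun a t => a ++ "\n" ++ t) s
      = L.foldl (fun a e => a ++ "\n" ++ pvFmtLine e) s := by
  rw [List.foldl_map]

theorem build_abbreviations_block_py_spec_aux
    (entries : List (List (String × Option String))) :
    build_abbreviations_block_py entries = build_abbreviations_block_py_alt entries := by
  unfold build_abbreviations_block_py build_abbreviations_block_py_alt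
  by_cases h : entries.isEmpty
  · simp [h]
  · simp only [h, Bool.false_eq_true, if_false]
    rw [pvSorted_part _ (pvTagged_le entries), pvTagged_filter0, pvTagged_filter1]
    set P := entries.filter (fun e => pvEntryGet e "table_name" == some (some "players")) with hP
    set S := entries.filter (fun e => pvEntryGet e "table_name" == some (some "player_stats")) with hS
    by_cases hp : P.isEmpty <;> by_cases hs : S.isEmpty
    · rw [List.isEmpty_iff.mp hp, List.isEmpty_iff.mp hs]
      simp [PySem.Str.join, PySem.Chars.join_singleton]
    · rw [List.isEmpty_iff.mp hp]
      have hS' : S ≠ [] := by simpa using hs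
      rw [show (!S.isEmpty) = true from by simp [hs], if_pos rfl,
        show (!(List.isEmpty (α := List (String × Option String)) [])) = false from rfl,
        if_neg (by simp)]
      rw [List.map_nil, List.nil_append, pvScan_start S 1 none _ (by simp) hS']
      rw [show ["COLUMN REFERENCE (abbreviation = full name -> SQL column):"] ++
            ["Player_stats table:"] ++ List.map pvFmtLine S
          = "COLUMN REFERENCE (abbreviation = full name -> SQL column):" ::
            ("Player_stats table:" :: List.map pvFmtLine S) from by simp]
      rw [pvJoin_foldl, List.foldl_cons, pvFoldl_map_fmt]
      rfl
    · rw [List.isEmpty_iff.mp hs]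
      have hP' : P ≠ [] := by simpa using hp
      rw [show (!(List.isEmpty (α := List (String × Option String)) [])) = false from rfl,
        if_neg (by simp), show (!P.isEmpty) = true from by simp [hp], if_pos rfl]
      rw [List.map_nil, List.append_nil, pvScan_start P 0 none _ (by simp) hP']
      rw [show ["COLUMN REFERENCE (abbreviation = full name -> SQL column):"] ++
            ["Players table:"] ++ List.map pvFmtLine P
          = "COLUMN REFERENCE (abbreviation = full name -> SQL column):" ::
            ("Players table:" :: List.map pvFmtLine P) from by simp]
      rw [pvJoin_foldl, List.foldl_cons, pvFoldl_map_fmt]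
      rfl
    · have hP' : P ≠ [] := by simpa using hp
      have hS' : S ≠ [] := by simpa using hs
      rw [show (!S.isEmpty) = true from by simp [hs], if_pos rfl,
        show (!P.isEmpty) = true from by simp [hp], if_pos rfl]
      rw [List.foldl_append, pvScan_start P 0 none _ (by simp) hP',
        pvScan_start S 1 (some 0) _ (by simp) hS']
      rw [show (["COLUMN REFERENCE (abbreviation = full name -> SQL column):"] ++
            ["Players table:"] ++ List.map pvFmtLine P) ++
            ["Player_stats table:"] ++ List.map pvFmtLine S
          = "COLUMN REFERENCE (abbreviation = full name -> SQL column):" ::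
            (("Players table:" :: List.map pvFmtLine P) ++
              ("Player_stats table:" :: List.map pvFmtLine S)) from by simp]
      rw [pvJoin_foldl]
      simp only [List.foldl_append, List.foldl_cons, List.foldl_map]
      rfl

-- ===== VERDICT (by name: the statement is the Claim_ definition above) =====
theorem build_abbreviations_block_py_spec : Claim_equal_build_abbreviations_block_py := by
  intro entries _ _
  exact build_abbreviations_block_py_spec_aux entries
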